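-- pv_equiv track=rewrite | github.com/BirdVox/cramer2020icassp | annotations.py | get_modified_taxonomy_idxs
-- ===== SOURCE A (Python) =====
-- def get_modified_taxonomy_idxs(taxonomy, filter_dict):
--     coarse_idx = 0
--     medium_idx = 0
--     fine_idx = 0
--
--     coarse_idxs = {}
--     medium_idxs = {}
--     fine_idxs = {}
--
--     for coarse_code, medium_dict in taxonomy.items():
--         coarse_code = str(coarse_code)
--         if coarse_code in filter_dict['coarse'].get('ignore', []):
--             continue
--         if 'X' not in coarse_code:
--             if coarse_code not in filter_dict['coarse'].get('other', []):
--                 coarse_idxs[coarse_code] = coarse_idx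
--                 coarse_idx += 1
--             else:
--                 coarse_idxs[coarse_code] = -1
--
--         for medium_code, fine_dict in medium_dict.items():
--             medium_code = str(medium_code)
--             if medium_code in filter_dict['medium'].get('ignore', []):
--                 continue
--             if 'X' not in medium_code:
--                 if medium_code not in filter_dict['medium'].get('other', []):
--                     medium_idxs[medium_code] = medium_idx
--                     medium_idx += 1
--                 else:
--                     medium_idxs[medium_code] = -1
--
--             for fine_code in fine_dict.keys():
--                 fine_code = str(fine_code)
--                 if fine_code in filter_dict['fine'].get('ignore', []):
--                     continue
--                 if 'X' not in fine_code:
--                     if fine_code not in filter_dict['fine'].get('other', []):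
--                         fine_idxs[fine_code] = fine_idx
--                         fine_idx += 1
--                     else:
--                         fine_idxs[fine_code] = -1
--
--     # Set all other classes to map to the last index
--     for k in coarse_idxs.keys():
--         if coarse_idxs[k] == -1:
--             coarse_idxs[k] = coarse_idx
--     for k in medium_idxs.keys():
--         if medium_idxs[k] == -1:
--             medium_idxs[k] = medium_idx
--     for k in fine_idxs.keys():
--         if fine_idxs[k] == -1:
--             fine_idxs[k] = fine_idx
--
--     return coarse_idxs, medium_idxs, fine_idxs
-- ===== SOURCE B (Python) =====
-- def get_modified_taxonomy_idxs(taxonomy, filter_dict):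
--     # One traversal collecting the surviving codes per level (duplicates kept, order kept).
--     coarse_codes, medium_codes, fine_codes = [], [], []
--     for coarse_code, medium_dict in taxonomy.items():
--         coarse_code = str(coarse_code)
--         if coarse_code in filter_dict['coarse'].get('ignore', []):
--             continue
--         coarse_codes.append(coarse_code)
--         for medium_code, fine_dict in medium_dict.items():
--             medium_code = str(medium_code)
--             if medium_code in filter_dict['medium'].get('ignore', []):
--                 continue
--             medium_codes.append(medium_code)
--             for fine_code in fine_dict.keys():
--                 fine_code = str(fine_code)
--                 if fine_code not in filter_dict['fine'].get('ignore', []):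
--                     fine_codes.append(fine_code)
--
--     # One uniform index-building pass per level.
--     def build(codes, name):
--         idxs, n = {}, 0
--         for c in codes:
--             if 'X' in c:
--                 continue
--             if c in filter_dict[name].get('other', []):
--                 idxs[c] = -1
--             else:
--                 idxs[c] = n
--                 n += 1
--         return {k: (n if v == -1 else v) for k, v in idxs.items()}
--
--     return (build(coarse_codes, 'coarse'),
--             build(medium_codes, 'medium'),
--             build(fine_codes, 'fine'))
-- ===== Notes on version B (the rewrite author's own statement) =====
-- stated objective: simpler
-- what changed: A's single monolithic triple-nested loop interleaving three counters and three dicts (plus three in-place -1-remap loops) is replaced by one collection traversal that gathers the surviving code list per level and a single uniform build pass (index assignment + remap via a comprehension) applied once per level.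
import Mathlib
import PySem

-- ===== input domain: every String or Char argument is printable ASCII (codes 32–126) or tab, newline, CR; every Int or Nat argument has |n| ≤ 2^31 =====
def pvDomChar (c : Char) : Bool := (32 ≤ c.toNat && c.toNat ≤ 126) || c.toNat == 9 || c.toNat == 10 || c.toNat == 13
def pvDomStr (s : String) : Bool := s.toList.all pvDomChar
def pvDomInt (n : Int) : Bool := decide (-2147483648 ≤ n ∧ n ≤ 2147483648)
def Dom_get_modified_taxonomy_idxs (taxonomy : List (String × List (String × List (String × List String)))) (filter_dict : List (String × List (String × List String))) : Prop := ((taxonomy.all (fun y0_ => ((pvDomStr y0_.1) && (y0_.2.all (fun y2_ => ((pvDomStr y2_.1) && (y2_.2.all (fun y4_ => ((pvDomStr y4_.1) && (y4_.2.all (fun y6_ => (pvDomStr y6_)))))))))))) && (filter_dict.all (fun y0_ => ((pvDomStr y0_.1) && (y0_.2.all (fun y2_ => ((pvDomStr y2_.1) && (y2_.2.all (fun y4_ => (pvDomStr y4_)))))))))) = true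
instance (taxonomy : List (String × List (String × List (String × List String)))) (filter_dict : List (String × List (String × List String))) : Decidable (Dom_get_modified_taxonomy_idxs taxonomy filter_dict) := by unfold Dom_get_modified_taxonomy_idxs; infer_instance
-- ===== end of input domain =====

-- B replaces A's monolithic triple-nested loop that interleaves counter/dict updates for all
-- three levels with a single collection traversal (three surviving-code lists) followed by one
-- uniform per-level index-building pass; objective: simpler decomposition, same cost.

-- ===== PORT A =====
-- A's filter lookup filter_dict['coarse'].get('ignore', []): the [..] indexing raises KeyError
-- when the key is missing; the port totalises it with getD and Pre_ excludes exactly those inputs.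
def pvAFine (fIgn fOth : List String) (f : Int × PySem.Dict String Int) (r : String × List String) : Int × PySem.Dict String Int :=
  if fIgn.contains r.1 then f
  else if !(PySem.Str.isIn "X" r.1) then
    (if !(fOth.contains r.1) then (f.1 + 1, f.2.insert r.1 f.1) else (f.1, f.2.insert r.1 (-1)))
  else f

def pvAMed (mIgn mOth fIgn fOth : List String)
    (mf : (Int × PySem.Dict String Int) × (Int × PySem.Dict String Int))
    (q : String × List (String × List String)) :
    (Int × PySem.Dict String Int) × (Int × PySem.Dict String Int) :=
  if mIgn.contains q.1 then mf
  else
    let m := if !(PySem.Str.isIn "X" q.1) then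
        (if !(mOth.contains q.1) then (mf.1.1 + 1, mf.1.2.insert q.1 mf.1.1)
         else (mf.1.1, mf.1.2.insert q.1 (-1)))
      else mf.1
    (m, q.2.foldl (pvAFine fIgn fOth) mf.2)

def pvACoarse (cIgn cOth mIgn mOth fIgn fOth : List String)
    (s : (Int × PySem.Dict String Int) × (Int × PySem.Dict String Int) × (Int × PySem.Dict String Int))
    (p : String × List (String × List (String × List String))) :
    (Int × PySem.Dict String Int) × (Int × PySem.Dict String Int) × (Int × PySem.Dict String Int) :=
  if cIgn.contains p.1 then s
  else
    let c := if !(PySem.Str.isIn "X" p.1) then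
        (if !(cOth.contains p.1) then (s.1.1 + 1, s.1.2.insert p.1 s.1.1)
         else (s.1.1, s.1.2.insert p.1 (-1)))
      else s.1
    (c, p.2.foldl (pvAMed mIgn mOth fIgn fOth) s.2)

-- the trailing 'for k in keys: if d[k] == -1: d[k] = idx' loop (written three times in A)
def pvARemap (n : Int) (d : PySem.Dict String Int) : PySem.Dict String Int :=
  d.keys.foldl (fun d k => if d.getD k 0 == -1 then d.insert k n else d) d

def get_modified_taxonomy_idxs (taxonomy : List (String × List (String × List (String × List String)))) (filter_dict : List (String × List (String × List String))) : (List (String × Int)) × (List (String × Int)) × (List (String × Int)) :=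
  let fd := PySem.Dict.mk filter_dict
  let cIgn := (PySem.Dict.mk (fd.getD "coarse" [])).getD "ignore" []
  let cOth := (PySem.Dict.mk (fd.getD "coarse" [])).getD "other" []
  let mIgn := (PySem.Dict.mk (fd.getD "medium" [])).getD "ignore" []
  let mOth := (PySem.Dict.mk (fd.getD "medium" [])).getD "other" []
  let fIgn := (PySem.Dict.mk (fd.getD "fine" [])).getD "ignore" []
  let fOth := (PySem.Dict.mk (fd.getD "fine" [])).getD "other" []
  let st := taxonomy.foldl (pvACoarse cIgn cOth mIgn mOth fIgn fOth)
    (((0 : Int), (PySem.Dict.empty : PySem.Dict String Int)),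
     ((0 : Int), (PySem.Dict.empty : PySem.Dict String Int)),
     ((0 : Int), (PySem.Dict.empty : PySem.Dict String Int)))
  ((pvARemap st.1.1 st.1.2).items, (pvARemap st.2.1.1 st.2.1.2).items, (pvARemap st.2.2.1 st.2.2.2).items)

-- ===== PORT B =====
def pvColFine (fIgn : List String) (acc : List String × List String × List String) (r : String × List String) : List String × List String × List String :=
  if fIgn.contains r.1 then acc else (acc.1, acc.2.1, acc.2.2 ++ [r.1])

def pvColMed (mIgn fIgn : List String) (acc : List String × List String × List String) (q : String × List (String × List String)) : List String × List String × List String :=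
  if mIgn.contains q.1 then acc
  else q.2.foldl (pvColFine fIgn) (acc.1, acc.2.1 ++ [q.1], acc.2.2)

def pvColCoarse (cIgn mIgn fIgn : List String) (acc : List String × List String × List String) (p : String × List (String × List (String × List String))) : List String × List String × List String :=
  if cIgn.contains p.1 then acc
  else p.2.foldl (pvColMed mIgn fIgn) (acc.1 ++ [p.1], acc.2)

def pvBStep (oth : List String) (st : PySem.Dict String Int × Int) (c : String) : PySem.Dict String Int × Int :=
  if PySem.Str.isIn "X" c then st
  else if oth.contains c then (st.1.insert c (-1), st.2)
  else (st.1.insert c st.2, st.2 + 1)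

def pvBuild (oth : List String) (codes : List String) : List (String × Int) :=
  let st := codes.foldl (pvBStep oth) ((PySem.Dict.empty : PySem.Dict String Int), (0 : Int))
  st.1.items.map (fun kv => (kv.1, if kv.2 == -1 then st.2 else kv.2))

def get_modified_taxonomy_idxs_alt (taxonomy : List (String × List (String × List (String × List String)))) (filter_dict : List (String × List (String × List String))) : (List (String × Int)) × (List (String × Int)) × (List (String × Int)) :=
  let fd := PySem.Dict.mk filter_dict
  let lvl := fun (name key : String) => (PySem.Dict.mk (fd.getD name [])).getD key []
  let codes := taxonomy.foldl (pvColCoarse (lvl "coarse" "ignore") (lvl "medium" "ignore") (lvl "fine" "ignore")) ([], [], [])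
  (pvBuild (lvl "coarse" "other") codes.1,
   pvBuild (lvl "medium" "other") codes.2.1,
   pvBuild (lvl "fine" "other") codes.2.2)

-- ===== PRECONDITION & SPEC =====
-- Pre_ excludes exactly the inputs on which the Python A raises KeyError: filter_dict['coarse'] is
-- read once the taxonomy is non-empty, filter_dict['medium'] once a surviving coarse node has
-- children, filter_dict['fine'] once a surviving medium node has children.
def Pre_get_modified_taxonomy_idxs (taxonomy : List (String × List (String × List (String × List String)))) (filter_dict : List (String × List (String × List String))) : Prop :=
  taxonomy = [] ∨
    ((PySem.Dict.mk filter_dict).contains "coarse" = true ∧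
     (∀ p ∈ taxonomy,
        ((PySem.Dict.mk ((PySem.Dict.mk filter_dict).getD "coarse" [])).getD "ignore" []).contains p.1 = false →
        p.2 ≠ [] → (PySem.Dict.mk filter_dict).contains "medium" = true) ∧
     (∀ p ∈ taxonomy,
        ((PySem.Dict.mk ((PySem.Dict.mk filter_dict).getD "coarse" [])).getD "ignore" []).contains p.1 = false →
        ∀ q ∈ p.2,
          ((PySem.Dict.mk ((PySem.Dict.mk filter_dict).getD "medium" [])).getD "ignore" []).contains q.1 = false →
          q.2 ≠ [] → (PySem.Dict.mk filter_dict).contains "fine" = true))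
instance (taxonomy : List (String × List (String × List (String × List String)))) (filter_dict : List (String × List (String × List String))) : Decidable (Pre_get_modified_taxonomy_idxs taxonomy filter_dict) := by unfold Pre_get_modified_taxonomy_idxs; infer_instance

def pvWitness_get_modified_taxonomy_idxs : (List (String × List (String × List (String × List String)))) × (List (String × List (String × List String))) :=
  ([("1", [("1-1", [("1-1-1", ["a"])]), ("1-X", [])]), ("2", [])],
   [("coarse", [("ignore", ["2"]), ("other", ["1"])]), ("medium", []), ("fine", [("other", ["1-1-1"])])])

def Spec_get_modified_taxonomy_idxs (taxonomy : List (String × List (String × List (String × List String)))) (filter_dict : List (String × List (String × List String))) (out : (List (String × Int)) × (List (String × Int)) × (List (String × Int))) : Prop := out = get_modified_taxonomy_idxs_alt taxonomy filter_dict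
instance (taxonomy : List (String × List (String × List (String × List String)))) (filter_dict : List (String × List (String × List String))) (out : (List (String × Int)) × (List (String × Int)) × (List (String × Int))) : Decidable (Spec_get_modified_taxonomy_idxs taxonomy filter_dict out) := by unfold Spec_get_modified_taxonomy_idxs; infer_instance

-- ===== CLAIM (what is proved, stated in full; the proofs are below) =====
def Claim_equal_get_modified_taxonomy_idxs : Prop := ∀ (taxonomy : List (String × List (String × List (String × List String)))) (filter_dict : List (String × List (String × List String))), Dom_get_modified_taxonomy_idxs taxonomy filter_dict → Pre_get_modified_taxonomy_idxs taxonomy filter_dict → Spec_get_modified_taxonomy_idxs taxonomy filter_dict (get_modified_taxonomy_idxs taxonomy filter_dict)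

-- ===== LEMMAS AND PROOFS =====

-- closed forms of the code lists B collects
def pvFCodes (fIgn : List String) (l : List (String × List String)) : List String :=
  (l.filter (fun r => !(fIgn.contains r.1))).map (·.1)
def pvMCodes (mIgn : List String) (l : List (String × List (String × List String))) : List String :=
  (l.filter (fun q => !(mIgn.contains q.1))).map (·.1)
def pvFCodes2 (mIgn fIgn : List String) (l : List (String × List (String × List String))) : List String :=
  l.flatMap (fun q => if mIgn.contains q.1 then [] else pvFCodes fIgn q.2)
def pvCCodes (cIgn : List String) (t : List (String × List (String × List (String × List String)))) : List String :=
  (t.filter (fun p => !(cIgn.contains p.1))).map (·.1)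
def pvMCodes2 (cIgn mIgn : List String) (t : List (String × List (String × List (String × List String)))) : List String :=
  t.flatMap (fun p => if cIgn.contains p.1 then [] else pvMCodes mIgn p.2)
def pvFCodes3 (cIgn mIgn fIgn : List String) (t : List (String × List (String × List (String × List String)))) : List String :=
  t.flatMap (fun p => if cIgn.contains p.1 then [] else pvFCodes2 mIgn fIgn p.2)

-- A's per-code action on one (idx, dict) level state
def pvStA (oth : List String) (s : Int × PySem.Dict String Int) (c : String) : Int × PySem.Dict String Int :=
  if !(PySem.Str.isIn "X" c) then
    (if !(oth.contains c) then (s.1 + 1, s.2.insert c s.1) else (s.1, s.2.insert c (-1)))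
  else s

theorem pvColFine_spec (fIgn : List String) (l : List (String × List String)) (acc : List String × List String × List String) :
    l.foldl (pvColFine fIgn) acc = (acc.1, acc.2.1, acc.2.2 ++ pvFCodes fIgn l) := by
  induction l generalizing acc with
  | nil => simp [pvFCodes]
  | cons r l ih =>
    simp only [List.foldl_cons, pvColFine]
    by_cases h : r.1 ∈ fIgn
    · simp [h, ih, pvFCodes]
    · simp [h, ih, pvFCodes]

theorem pvColMed_spec (mIgn fIgn : List String) (l : List (String × List (String × List String))) (acc : List String × List String × List String) :
    l.foldl (pvColMed mIgn fIgn) acc = (acc.1, acc.2.1 ++ pvMCodes mIgn l, acc.2.2 ++ pvFCodes2 mIgn fIgn l) := by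
  induction l generalizing acc with
  | nil => simp [pvMCodes, pvFCodes2]
  | cons q l ih =>
    simp only [List.foldl_cons, pvColMed]
    by_cases h : q.1 ∈ mIgn
    · simp [h, ih, pvMCodes, pvFCodes2]
    · simp [h, pvColFine_spec, ih, pvMCodes, pvFCodes2]

theorem pvColCoarse_spec (cIgn mIgn fIgn : List String) (t : List (String × List (String × List (String × List String)))) (acc : List String × List String × List String) :
    t.foldl (pvColCoarse cIgn mIgn fIgn) acc = (acc.1 ++ pvCCodes cIgn t, acc.2.1 ++ pvMCodes2 cIgn mIgn t, acc.2.2 ++ pvFCodes3 cIgn mIgn fIgn t) := by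
  induction t generalizing acc with
  | nil => simp [pvCCodes, pvMCodes2, pvFCodes3]
  | cons p t ih =>
    simp only [List.foldl_cons, pvColCoarse]
    by_cases h : p.1 ∈ cIgn
    · simp [h, ih, pvCCodes, pvMCodes2, pvFCodes3]
    · simp [h, pvColMed_spec, ih, pvCCodes, pvMCodes2, pvFCodes3]

theorem pvAFine_spec (fIgn fOth : List String) (l : List (String × List String)) (f : Int × PySem.Dict String Int) :
    l.foldl (pvAFine fIgn fOth) f = (pvFCodes fIgn l).foldl (pvStA fOth) f := by
  induction l generalizing f with
  | nil => simp [pvFCodes]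
  | cons r l ih =>
    simp only [List.foldl_cons, pvAFine]
    by_cases h : r.1 ∈ fIgn
    · simp [h, ih, pvFCodes]
    · rw [if_neg (by simp [h])]
      rw [ih]
      have : pvFCodes fIgn (r :: l) = r.1 :: pvFCodes fIgn l := by simp [pvFCodes, h]
      rw [this, List.foldl_cons, pvStA]

theorem pvAMed_spec (mIgn mOth fIgn fOth : List String) (l : List (String × List (String × List String)))
    (mf : (Int × PySem.Dict String Int) × (Int × PySem.Dict String Int)) :
    l.foldl (pvAMed mIgn mOth fIgn fOth) mf =
      ((pvMCodes mIgn l).foldl (pvStA mOth) mf.1, (pvFCodes2 mIgn fIgn l).foldl (pvStA fOth) mf.2) := by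
  induction l generalizing mf with
  | nil => simp [pvMCodes, pvFCodes2]
  | cons q l ih =>
    simp only [List.foldl_cons, pvAMed]
    by_cases h : q.1 ∈ mIgn
    · simp [h, ih, pvMCodes, pvFCodes2]
    · rw [if_neg (by simp [h])]
      rw [ih]
      have hm : pvMCodes mIgn (q :: l) = q.1 :: pvMCodes mIgn l := by simp [pvMCodes, h]
      have hf : pvFCodes2 mIgn fIgn (q :: l) = pvFCodes fIgn q.2 ++ pvFCodes2 mIgn fIgn l := by
        simp [pvFCodes2, h]
      rw [hm, hf, List.foldl_cons, List.foldl_append, pvAFine_spec]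
      simp [pvStA]

theorem pvACoarse_spec (cIgn cOth mIgn mOth fIgn fOth : List String)
    (t : List (String × List (String × List (String × List String))))
    (s : (Int × PySem.Dict String Int) × (Int × PySem.Dict String Int) × (Int × PySem.Dict String Int)) :
    t.foldl (pvACoarse cIgn cOth mIgn mOth fIgn fOth) s =
      ((pvCCodes cIgn t).foldl (pvStA cOth) s.1,
       (pvMCodes2 cIgn mIgn t).foldl (pvStA mOth) s.2.1,
       (pvFCodes3 cIgn mIgn fIgn t).foldl (pvStA fOth) s.2.2) := by
  induction t generalizing s with
  | nil => simp [pvCCodes, pvMCodes2, pvFCodes3]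
  | cons p t ih =>
    simp only [List.foldl_cons, pvACoarse]
    by_cases h : p.1 ∈ cIgn
    · simp [h, ih, pvCCodes, pvMCodes2, pvFCodes3]
    · rw [if_neg (by simp [h])]
      rw [ih]
      have hc : pvCCodes cIgn (p :: t) = p.1 :: pvCCodes cIgn t := by simp [pvCCodes, h]
      have hm : pvMCodes2 cIgn mIgn (p :: t) = pvMCodes mIgn p.2 ++ pvMCodes2 cIgn mIgn t := by
        simp [pvMCodes2, h]
      have hf : pvFCodes3 cIgn mIgn fIgn (p :: t) = pvFCodes2 mIgn fIgn p.2 ++ pvFCodes3 cIgn mIgn fIgn t := by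
        simp [pvFCodes3, h]
      rw [hc, hm, hf, List.foldl_cons, List.foldl_append, List.foldl_append, pvAMed_spec]
      simp [pvStA]

-- A's per-level fold is B's build fold with the state components swapped
theorem pvStA_swap (oth : List String) (l : List String) (s : Int × PySem.Dict String Int) :
    l.foldl (pvStA oth) s = ((l.foldl (pvBStep oth) (s.2, s.1)).2, (l.foldl (pvBStep oth) (s.2, s.1)).1) := by
  induction l generalizing s with
  | nil => simp
  | cons c l ih =>
    rw [List.foldl_cons, List.foldl_cons]
    by_cases hx : PySem.Chars.isIn ['X'] c.toList = true
    · have h1 : pvStA oth s c = s := by simp [pvStA, hx]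
      have h2 : pvBStep oth (s.2, s.1) c = (s.2, s.1) := by simp [pvBStep, hx]
      rw [h1, h2]; exact ih s
    · by_cases ho : c ∈ oth
      · have h1 : pvStA oth s c = (s.1, s.2.insert c (-1)) := by simp [pvStA, hx, ho]
        have h2 : pvBStep oth (s.2, s.1) c = (s.2.insert c (-1), s.1) := by simp [pvBStep, hx, ho]
        rw [h1, h2]; exact ih _
      · have h1 : pvStA oth s c = (s.1 + 1, s.2.insert c s.1) := by simp [pvStA, hx, ho]
        have h2 : pvBStep oth (s.2, s.1) c = (s.2.insert c s.1, s.1 + 1) := by simp [pvBStep, hx, ho]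
        rw [h1, h2]; exact ih _

theorem pvBStep_nodup (oth : List String) (l : List String) (st : PySem.Dict String Int × Int)
    (h : st.1.keys.Nodup) : ((l.foldl (pvBStep oth) st).1).keys.Nodup := by
  induction l generalizing st with
  | nil => exact h
  | cons c l ih =>
    rw [List.foldl_cons]
    by_cases hx : PySem.Chars.isIn ['X'] c.toList = true
    · have h1 : pvBStep oth st c = st := by simp [pvBStep, hx]
      rw [h1]; exact ih st h
    · by_cases ho : c ∈ oth
      · have h1 : pvBStep oth st c = (st.1.insert c (-1), st.2) := by simp [pvBStep, hx, ho]
        rw [h1]; exact ih _ (PySem.Dict.nodup_keys_insert _ _ _ h)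
      · have h1 : pvBStep oth st c = (st.1.insert c st.2, st.2 + 1) := by simp [pvBStep, hx, ho]
        rw [h1]; exact ih _ (PySem.Dict.nodup_keys_insert _ _ _ h)

theorem pvRemap_fold (n : Int) (ks : List String) (d : PySem.Dict String Int)
    (hks : ks.Nodup) (hnd : d.keys.Nodup) (hmem : ∀ k ∈ ks, d.contains k = true) :
    (ks.foldl (fun d k => if d.getD k 0 == -1 then d.insert k n else d) d).items =
      d.items.map (fun kv => if ks.contains kv.1 then (kv.1, if kv.2 == -1 then n else kv.2) else kv) := by
  induction ks generalizing d with
  | nil => simp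
  | cons k ks ih =>
    rw [List.foldl_cons]
    have hk : k ∉ ks := (List.nodup_cons.mp hks).1
    have hks' : ks.Nodup := (List.nodup_cons.mp hks).2
    have hcont : d.contains k = true := hmem k (List.mem_cons_self)
    obtain ⟨v, hv⟩ : ∃ v, d.get? k = some v := by
      rcases h' : d.get? k with _ | v
      · rw [PySem.Dict.contains_eq_isSome_get?, h'] at hcont; simp at hcont
      · exact ⟨v, rfl⟩
    have hval : ∀ kv ∈ d.items, kv.1 = k → kv.2 = v := by
      intro kv hkv hkk
      have h2 : d.get? kv.1 = some kv.2 :=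
        PySem.Dict.get?_of_mem_items d (by simpa using hkv) hnd
      rw [hkk, hv] at h2
      exact (Option.some_inj.mp h2).symm
    have hgetD : d.getD k 0 = v := by
      rw [PySem.Dict.getD_eq_get?_getD, hv]; rfl
    by_cases hv2 : v = -1
    · rw [if_pos (by simp [hgetD, hv2])]
      have hkeys : (d.insert k n).keys = d.keys := PySem.Dict.keys_insert_of_contains _ _ hcont
      rw [ih (d.insert k n) hks' (by rw [hkeys]; exact hnd)
            (fun k' hk' => by
              rw [PySem.Dict.contains_insert]
              simp [hmem k' (List.mem_cons_of_mem _ hk')])]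
      rw [PySem.Dict.items_insert_of_contains _ _ hcont, List.map_map]
      apply List.map_congr_left
      intro kv hkv
      obtain ⟨a, b⟩ := kv
      by_cases hkk : a = k
      · have hb : b = v := hval (a, b) hkv hkk
        subst hkk; subst hb
        simp [Function.comp, hk, hv2]
      · simp [Function.comp, hkk]
    · rw [if_neg (by simp [hgetD, hv2])]
      rw [ih d hks' hnd (fun k' hk' => hmem k' (List.mem_cons_of_mem _ hk'))]
      apply List.map_congr_left
      intro kv hkv
      obtain ⟨a, b⟩ := kv
      by_cases hkk : a = k
      · have hb : b = v := hval (a, b) hkv hkk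
        subst hkk; subst hb
        simp [hk, hv2]
      · simp [hkk]

theorem pvRemap_items (n : Int) (d : PySem.Dict String Int) (hnd : d.keys.Nodup) :
    (pvARemap n d).items = d.items.map (fun kv => (kv.1, if kv.2 == -1 then n else kv.2)) := by
  unfold pvARemap
  rw [pvRemap_fold n d.keys d hnd hnd (fun k hk => by
        rw [PySem.Dict.contains_eq_decide_mem_keys]; simp [hk])]
  apply List.map_congr_left
  intro kv hkv
  have : kv.1 ∈ d.keys := PySem.Dict.mem_keys_of_mem_items d hkv
  simp [this]

-- one level: A's (count, fold, remap) equals B's build on the same code list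
theorem pvLevel (oth : List String) (codes : List String) :
    (pvARemap ((codes.foldl (pvStA oth) ((0 : Int), (PySem.Dict.empty : PySem.Dict String Int))).1)
        ((codes.foldl (pvStA oth) ((0 : Int), (PySem.Dict.empty : PySem.Dict String Int))).2)).items =
      pvBuild oth codes := by
  rw [pvStA_swap]
  have hnd : ((codes.foldl (pvBStep oth) ((PySem.Dict.empty : PySem.Dict String Int), (0 : Int))).1).keys.Nodup :=
    pvBStep_nodup oth codes _ PySem.Dict.nodup_keys_empty
  unfold pvBuild
  rw [pvRemap_items _ _ hnd]

-- ===== VERDICT (by name: the statement is the Claim_ definition above) =====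
theorem get_modified_taxonomy_idxs_spec : Claim_equal_get_modified_taxonomy_idxs := by
  intro taxonomy filter_dict _ _
  unfold Spec_get_modified_taxonomy_idxs
  simp only [get_modified_taxonomy_idxs, get_modified_taxonomy_idxs_alt,
    pvACoarse_spec, pvColCoarse_spec, List.nil_append]
  rw [pvLevel, pvLevel, pvLevel]
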